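-- pv_equiv track=rewrite | github.com/sarasdsutah/AI-Data-Assistant | streamlit_app.py | make_unique_source_names
-- ===== SOURCE A (Python) =====
-- def make_unique_source_names(source_names: list[str]) -> list[str]:
--     totals: dict[str, int] = {}
--     for source_name in source_names:
--         totals[source_name] = totals.get(source_name, 0) + 1
--
--     seen: dict[str, int] = {}
--     unique_names: list[str] = []
--     for source_name in source_names:
--         seen[source_name] = seen.get(source_name, 0) + 1
--         if totals[source_name] == 1:
--             unique_names.append(source_name)
--         else:
--             unique_names.append(f"{source_name} ({seen[source_name]})")
--     return unique_names
-- ===== SOURCE B (Python) =====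
-- def make_unique_source_names(source_names: list[str]) -> list[str]:
--     # Group positions by name once, then scatter results by index.
--     positions: dict[str, list[int]] = {}
--     for i, name in enumerate(source_names):
--         positions.setdefault(name, []).append(i)
--     out = [""] * len(source_names)
--     for name, idxs in positions.items():
--         if len(idxs) == 1:
--             out[idxs[0]] = name
--         else:
--             for j, i in enumerate(idxs, 1):
--                 out[i] = f"{name} ({j})"
--     return out
-- ===== Notes on version B (the rewrite author's own statement) =====
-- stated objective: alternative
-- what changed: Replaced A's two counter-dict passes (totals then running seen counts, appending output left to right) by building one dict of per-name position lists and scattering each group's results into a preallocated output list by index.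
import Mathlib
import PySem

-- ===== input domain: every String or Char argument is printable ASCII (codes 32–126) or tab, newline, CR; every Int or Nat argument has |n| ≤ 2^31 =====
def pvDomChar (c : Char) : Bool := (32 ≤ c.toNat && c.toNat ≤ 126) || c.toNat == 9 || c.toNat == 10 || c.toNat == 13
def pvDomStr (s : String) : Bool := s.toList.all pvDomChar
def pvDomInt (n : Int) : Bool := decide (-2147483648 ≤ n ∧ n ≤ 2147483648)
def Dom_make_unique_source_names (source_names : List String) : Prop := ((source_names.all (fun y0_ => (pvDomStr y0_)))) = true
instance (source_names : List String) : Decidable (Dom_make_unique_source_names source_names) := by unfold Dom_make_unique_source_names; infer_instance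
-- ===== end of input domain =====

-- B replaces A's two counter passes by grouping positions per name once and scattering results by index (objective: alternative).

-- ===== PORT A =====
-- loop body of A's second pass, extracted as a named helper.
-- totals[source_name] is a plain key lookup in Python, but the key is always present
-- (totals was built from the same list), so getD with default 0 returns the same value.
def pvStepA (totals : PySem.Dict String Int) (st : PySem.Dict String Int × List String)
    (s : String) : PySem.Dict String Int × List String :=
  let seen := st.1.insert s (st.1.getD s 0 + 1)
  if totals.getD s 0 == 1 then (seen, st.2 ++ [s])
  else (seen, st.2 ++ [s ++ " (" ++ PySem.Int.toStr (seen.getD s 0) ++ ")"])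

def make_unique_source_names (source_names : List String) : List String :=
  let totals : PySem.Dict String Int :=
    source_names.foldl (fun d s => d.insert s (d.getD s 0 + 1)) PySem.Dict.empty
  (source_names.foldl (pvStepA totals) (PySem.Dict.empty, [])).2

-- ===== PORT B =====
-- inner loop body of B: 'out[i] = f"{name} ({j})"' for (j, i) from enumerate(idxs, 1)
-- (every written index is a valid position of the list, so the total pySetD is exact here).
def pvStepW (nm : String) (out : List String) (q : Int × Int) : List String :=
  PySem.List.pySetD out q.2 (nm ++ " (" ++ PySem.Int.toStr q.1 ++ ")")

-- outer loop body of B: one (name, positions-of-name) group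
def pvStepB (out : List String) (pr : String × List Int) : List String :=
  if pr.2.length == 1 then PySem.List.pySetD out (PySem.List.pyGetD pr.2 0 (-1)) pr.1
  else (PySem.List.enumerate pr.2 1).foldl (pvStepW pr.1) out

def make_unique_source_names_alt (source_names : List String) : List String :=
  -- positions.setdefault(name, []).append(i) is ported as the PySem grouping-loop
  -- pattern 'd.modify name [] (· ++ [i])' (same dict value, same key order)
  let positions : PySem.Dict String (List Int) :=
    (PySem.List.enumerate source_names 0).foldl
      (fun d p => d.modify p.2 [] (fun l => l ++ [p.1])) PySem.Dict.empty
  (positions.items.foldl pvStepB (List.replicate source_names.length ""))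

-- ===== PRECONDITION & SPEC =====
def Spec_make_unique_source_names (source_names : List String) (out : List String) : Prop := out = make_unique_source_names_alt source_names
instance (source_names : List String) (out : List String) : Decidable (Spec_make_unique_source_names source_names out) := by unfold Spec_make_unique_source_names; infer_instance

-- ===== CLAIM (what is proved, stated in full; the proofs are below) =====
def Claim_equal_make_unique_source_names : Prop := ∀ (source_names : List String), Dom_make_unique_source_names source_names → Spec_make_unique_source_names source_names (make_unique_source_names source_names)

-- ===== LEMMAS AND PROOFS =====

-- common reference shape: pvEmit L pre rest produces the outputs for the elements of
-- rest, given that pre is the already-processed prefix (L = pre ++ rest)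
def pvEmit (L : List String) : List String → List String → List String
  | _, [] => []
  | pre, s :: r =>
    (if (L.count s : Int) == 1 then s
     else s ++ " (" ++ PySem.Int.toStr ((pre.count s : Int) + 1) ++ ")") :: pvEmit L (pre ++ [s]) r

-- the intended value at position i of the result, in closed form
def pvExp (L : List String) (i : Nat) : String :=
  let s := L.getD i ""
  if (L.count s : Int) == 1 then s
  else s ++ " (" ++ PySem.Int.toStr (((L.take (i + 1)).count s : Nat) : Int) ++ ")"

-- positions (absolute indices, offset s) at which nm occurs in l
def pvOcc (l : List String) (s : Int) (nm : String) : List Int :=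
  ((PySem.List.enumerate l s).filter (fun p => p.2 == nm)).map (·.1)

theorem pvA_loop (L : List String) (totals : PySem.Dict String Int)
    (ht : ∀ s, totals.getD s 0 = (L.count s : Int)) :
    ∀ (rest pre : List String) (seen : PySem.Dict String Int) (acc : List String),
    (∀ s, seen.getD s 0 = (pre.count s : Int)) →
    (rest.foldl (pvStepA totals) (seen, acc)).2 = acc ++ pvEmit L pre rest := by
  intro rest
  induction rest with
  | nil => intro pre seen acc _; simp [pvEmit]
  | cons s r ih =>
    intro pre seen acc hseen
    have hsn : ∀ t, ((seen.insert s (seen.getD s 0 + 1)).getD t 0) = (((pre ++ [s]).count t : Nat) : Int) := by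
      intro t
      rw [PySem.Dict.getD_insert]
      by_cases h : t = s
      · subst h; simp [hseen, List.count_append]
      · simp [h, hseen, List.count_append, Ne.symm h]
    rw [List.foldl_cons]
    by_cases hc : (totals.getD s 0 == 1) = true
    · have hstep : pvStepA totals (seen, acc) s
          = (seen.insert s (seen.getD s 0 + 1), acc ++ [s]) := by
        simp [pvStepA, hc]
      have hc1 : ((L.count s : Int) == 1) = true := by rw [← ht s]; exact hc
      rw [hstep, ih (pre ++ [s]) _ _ hsn]
      simp [pvEmit, hc1]
    · have hc' : (totals.getD s 0 == 1) = false := by simpa using hc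
      have hstep : pvStepA totals (seen, acc) s
          = (seen.insert s (seen.getD s 0 + 1),
             acc ++ [s ++ " (" ++ PySem.Int.toStr ((seen.insert s (seen.getD s 0 + 1)).getD s 0) ++ ")"]) := by
        simp [pvStepA, hc']
      have hc1 : ((L.count s : Int) == 1) = false := by rw [← ht s]; exact hc'
      rw [hstep, ih (pre ++ [s]) _ _ hsn]
      simp [pvEmit, hc1, hsn s]

theorem pvEmit_length (L : List String) :
    ∀ (rest pre : List String), (pvEmit L pre rest).length = rest.length := by
  intro rest
  induction rest with
  | nil => intro pre; simp [pvEmit]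
  | cons s r ih => intro pre; simp [pvEmit, ih]

theorem pvEmit_getD (L : List String) :
    ∀ (rest pre : List String), L = pre ++ rest → ∀ (k : Nat), k < rest.length →
    (pvEmit L pre rest).getD k "" = pvExp L (pre.length + k) := by
  intro rest
  induction rest with
  | nil => intro pre _ k hk; simp at hk
  | cons x r ih =>
    intro pre hL k hk
    cases k with
    | zero =>
      have hget : L.getD pre.length "" = x := by
        rw [hL]
        rw [List.getD_eq_getElem?_getD, List.getElem?_append_right (by omega)]
        simp
      have htake : L.take (pre.length + 1) = pre ++ [x] := by
        rw [hL]
        simp [List.take_append]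
      simp only [pvEmit, pvExp, Nat.add_zero, List.getD_cons_zero, hget, htake]
      by_cases hc : ((L.count x : Int) == 1) = true
      · simp [hc]
      · have hc' : ((L.count x : Int) == 1) = false := by simpa using hc
        simp only [hc', Bool.false_eq_true, if_false, List.count_append]
        have : (((pre.count x + [x].count x : Nat)) : Int) = (pre.count x : Int) + 1 := by
          simp
        rw [this]
    | succ k =>
      have hL' : L = (pre ++ [x]) ++ r := by simp [hL]
      have := ih (pre ++ [x]) hL' k (by simpa using hk)
      simp only [pvEmit, List.getD_cons_succ]
      rw [this]
      congr 1
      simp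
      omega

theorem pvOcc_cons (x : String) (r : List String) (s : Int) (nm : String) :
    pvOcc (x :: r) s nm = (if x == nm then [s] else []) ++ pvOcc r (s + 1) nm := by
  by_cases h : (x == nm) = true
  · simp [pvOcc, PySem.List.enumerate_cons, h]
  · simp [pvOcc, PySem.List.enumerate_cons, h]

theorem pvOcc_lb : ∀ (l : List String) (s : Int) (nm : String) (x : Int),
    x ∈ pvOcc l s nm → s ≤ x ∧ x < s + l.length := by
  intro l
  induction l with
  | nil => intro s nm x hx; simp [pvOcc, PySem.List.enumerate_nil] at hx
  | cons y r ih =>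
    intro s nm x hx
    by_cases hy : (y == nm) = true
    · have h1 : pvOcc (y :: r) s nm = s :: pvOcc r (s + 1) nm := by
        rw [pvOcc_cons]; simp [hy]
      rw [h1, List.mem_cons] at hx
      rcases hx with rfl | hx
      · simp only [List.length_cons]; push_cast; omega
      · have := ih (s + 1) nm x hx
        simp only [List.length_cons]; push_cast; omega
    · have h1 : pvOcc (y :: r) s nm = pvOcc r (s + 1) nm := by
        rw [pvOcc_cons]; simp [hy]
      rw [h1] at hx
      have := ih (s + 1) nm x hx
      simp only [List.length_cons]; push_cast; omega

theorem pvOcc_nodup : ∀ (l : List String) (s : Int) (nm : String), (pvOcc l s nm).Nodup := by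
  intro l
  induction l with
  | nil => intro s nm; simp [pvOcc, PySem.List.enumerate_nil]
  | cons y r ih =>
    intro s nm
    by_cases hy : (y == nm) = true
    · have h1 : pvOcc (y :: r) s nm = s :: pvOcc r (s + 1) nm := by
        rw [pvOcc_cons]; simp [hy]
      rw [h1, List.nodup_cons]
      refine ⟨fun hmem => ?_, ih (s + 1) nm⟩
      have := pvOcc_lb r (s + 1) nm s hmem
      omega
    · have h1 : pvOcc (y :: r) s nm = pvOcc r (s + 1) nm := by
        rw [pvOcc_cons]; simp [hy]
      rw [h1]; exact ih (s + 1) nm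

theorem pvOcc_nonneg (l : List String) (nm : String) (x : Int) (hx : x ∈ pvOcc l 0 nm) : 0 ≤ x :=
  (pvOcc_lb l 0 nm x hx).1

theorem pvOcc_length : ∀ (l : List String) (s : Int) (nm : String),
    (pvOcc l s nm).length = l.count nm := by
  intro l
  induction l with
  | nil => intro s nm; simp [pvOcc, PySem.List.enumerate_nil]
  | cons y r ih =>
    intro s nm
    by_cases hy : (y == nm) = true
    · have h1 : pvOcc (y :: r) s nm = s :: pvOcc r (s + 1) nm := by
        rw [pvOcc_cons]; simp [hy]
      simp [h1, ih (s + 1) nm, List.count_cons, hy]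
    · have h1 : pvOcc (y :: r) s nm = pvOcc r (s + 1) nm := by
        rw [pvOcc_cons]; simp [hy]
      simp only [h1, ih (s + 1) nm, List.count_cons, hy]
      simp

theorem pvOcc_mem : ∀ (l : List String) (s : Int) (nm : String) (x : Int),
    x ∈ pvOcc l s nm ↔ ∃ k : Nat, k < l.length ∧ x = s + k ∧ l.getD k "" = nm := by
  intro l
  induction l with
  | nil => intro s nm x; simp [pvOcc, PySem.List.enumerate_nil]
  | cons y r ih =>
    intro s nm x
    constructor
    · intro hx
      by_cases hy : (y == nm) = true
      · have h1 : pvOcc (y :: r) s nm = s :: pvOcc r (s + 1) nm := by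
          rw [pvOcc_cons]; simp [hy]
        rw [h1, List.mem_cons] at hx
        rcases hx with rfl | hx
        · exact ⟨0, by simp, by simp, by simpa using hy⟩
        · rcases (ih (s + 1) nm x).1 hx with ⟨k, hk, hx', hget⟩
          exact ⟨k + 1, by simpa using hk, by push_cast; omega, by simpa using hget⟩
      · have h1 : pvOcc (y :: r) s nm = pvOcc r (s + 1) nm := by
          rw [pvOcc_cons]; simp [hy]
        rw [h1] at hx
        rcases (ih (s + 1) nm x).1 hx with ⟨k, hk, hx', hget⟩
        exact ⟨k + 1, by simpa using hk, by push_cast; omega, by simpa using hget⟩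
    · rintro ⟨k, hk, rfl, hget⟩
      cases k with
      | zero =>
        have hy : (y == nm) = true := by simpa using hget
        have h1 : pvOcc (y :: r) s nm = s :: pvOcc r (s + 1) nm := by
          rw [pvOcc_cons]; simp [hy]
        simp [h1]
      | succ k =>
        have htail : ((s + 1) + (k : Int)) ∈ pvOcc r (s + 1) nm :=
          (ih (s + 1) nm _).2 ⟨k, by simpa using hk, rfl, by simpa using hget⟩
        have hx : (s + ((k + 1 : Nat) : Int)) ∈ pvOcc r (s + 1) nm := by
          rw [show (s + ((k + 1 : Nat) : Int)) = (s + 1) + (k : Int) by push_cast; omega]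
          exact htail
        by_cases hy : (y == nm) = true
        · have h1 : pvOcc (y :: r) s nm = s :: pvOcc r (s + 1) nm := by
            rw [pvOcc_cons]; simp [hy]
          rw [h1, List.mem_cons]; exact Or.inr hx
        · have h1 : pvOcc (y :: r) s nm = pvOcc r (s + 1) nm := by
            rw [pvOcc_cons]; simp [hy]
          rw [h1]; exact hx

theorem pvOcc_idxOf : ∀ (l : List String) (s : Int) (nm : String) (k : Nat),
    k < l.length → l.getD k "" = nm →
    (pvOcc l s nm).idxOf (s + k) + 1 = (l.take (k + 1)).count nm := by
  intro l
  induction l with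
  | nil => intro s nm k hk; simp at hk
  | cons y r ih =>
    intro s nm k hk hget
    cases k with
    | zero =>
      have hy : (y == nm) = true := by simpa using hget
      have h1 : pvOcc (y :: r) s nm = s :: pvOcc r (s + 1) nm := by
        rw [pvOcc_cons]; simp [hy]
      simp [h1, List.count_cons, hy]
    | succ k =>
      have hk' : k < r.length := by simpa using hk
      have hget' : r.getD k "" = nm := by simpa using hget
      have hih := ih (s + 1) nm k hk' hget'
      have hcast : s + ((k + 1 : Nat) : Int) = (s + 1) + (k : Int) := by push_cast; omega
      by_cases hy : (y == nm) = true
      · have h1 : pvOcc (y :: r) s nm = s :: pvOcc r (s + 1) nm := by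
          rw [pvOcc_cons]; simp [hy]
        rw [h1, List.idxOf_cons]
        have hne : (s == s + ((k + 1 : Nat) : Int)) = false := by
          simp only [beq_eq_false_iff_ne, ne_eq]; push_cast; omega
        rw [hne, hcast]
        simp only [cond_false, List.take_succ_cons, List.count_cons, hy]
        simp
        omega
      · have h1 : pvOcc (y :: r) s nm = pvOcc r (s + 1) nm := by
          rw [pvOcc_cons]; simp [hy]
        rw [h1, hcast]
        simp only [List.take_succ_cons, List.count_cons, hy]
        simpa using hih

-- the grouping pass: positions.getD nm [] collects the occurrence indices in order
theorem pvGrp : ∀ (ps : List (Int × String)) (d : PySem.Dict String (List Int)) (nm : String),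
    (ps.foldl (fun d p => d.modify p.2 [] (fun l => l ++ [p.1])) d).getD nm []
      = d.getD nm [] ++ (ps.filter (fun p => p.2 == nm)).map (·.1) := by
  intro ps
  induction ps with
  | nil => intro d nm; simp
  | cons p r ih =>
    intro d nm
    rw [List.foldl_cons, ih, List.filter_cons]
    rw [PySem.Dict.getD_modify]
    by_cases hp : (p.2 == nm) = true
    · have he : nm = p.2 := (eq_of_beq hp).symm
      rw [if_pos he, hp]
      simp [he]
    · have hp' : (p.2 == nm) = false := by simpa using hp
      have hne : ¬ nm = p.2 := fun h => by simp [h] at hp'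
      rw [if_neg hne, hp']
      simp

theorem pvSetD_getD (out : List String) (x : Int) (v : String) (hx : 0 ≤ x) (i : Nat)
    (hi : i < out.length) :
    (PySem.List.pySetD out x v).getD i "" = if x = (i : Int) then v else out.getD i "" := by
  rw [PySem.List.pySetD_of_nonneg _ _ hx]
  by_cases h : x = (i : Int)
  · have : x.toNat = i := by omega
    rw [this, if_pos h]
    rw [List.getD_eq_getElem?_getD, List.getElem?_set_self (by omega)]
    simp
  · have hne : x.toNat ≠ i := by omega
    rw [if_neg h, List.getD_eq_getElem?_getD, List.getElem?_set_ne hne, ← List.getD_eq_getElem?_getD]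

theorem pvSetD_len (out : List String) (x : Int) (v : String) :
    (PySem.List.pySetD out x v).length = out.length := by
  simp [PySem.List.length_pySetD]

theorem pvInnerLen (nm : String) : ∀ (idxs : List Int) (j : Int) (out : List String),
    ((PySem.List.enumerate idxs j).foldl (pvStepW nm) out).length = out.length := by
  intro idxs
  induction idxs with
  | nil => intro j out; simp [PySem.List.enumerate_nil]
  | cons x r ih =>
    intro j out
    rw [PySem.List.enumerate_cons, List.foldl_cons, ih]
    simp [pvStepW]

theorem pvInner (nm : String) : ∀ (idxs : List Int) (j : Int) (out : List String),
    idxs.Nodup → (∀ x ∈ idxs, 0 ≤ x) →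
    ∀ (i : Nat), i < out.length →
      ((PySem.List.enumerate idxs j).foldl (pvStepW nm) out).getD i "" =
        if (i : Int) ∈ idxs then
          nm ++ " (" ++ PySem.Int.toStr (j + ((idxs.idxOf (i : Int) : Nat) : Int)) ++ ")"
        else out.getD i "" := by
  intro idxs
  induction idxs with
  | nil => intro j out _ _ i hi; simp [PySem.List.enumerate_nil]
  | cons x r ih =>
    intro j out hnd h0 i hi
    rw [PySem.List.enumerate_cons, List.foldl_cons]
    have hnd' : r.Nodup := (List.nodup_cons.1 hnd).2
    have hxr : x ∉ r := (List.nodup_cons.1 hnd).1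
    have h0' : ∀ y ∈ r, 0 ≤ y := fun y hy => h0 y (List.mem_cons_of_mem _ hy)
    have hout' : (pvStepW nm out (j, x)).length = out.length := by
      simp [pvStepW]
    have := ih (j + 1) (pvStepW nm out (j, x)) hnd' h0' i (by rw [hout']; exact hi)
    rw [this]
    have hsetd : (pvStepW nm out (j, x)).getD i "" =
        if x = (i : Int) then nm ++ " (" ++ PySem.Int.toStr j ++ ")" else out.getD i "" := by
      simp only [pvStepW]
      exact pvSetD_getD out x _ (h0 x (List.mem_cons_self)) i hi
    by_cases hmem : (i : Int) ∈ r
    · have hne : (x == (i : Int)) = false := by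
        simp only [beq_eq_false_iff_ne, ne_eq]
        intro h; exact hxr (h ▸ hmem)
      rw [if_pos hmem, if_pos (List.mem_cons_of_mem _ hmem), List.idxOf_cons, hne]
      simp only [cond_false]
      have harith : j + 1 + ((r.idxOf (i : Int) : Nat) : Int)
          = j + ((r.idxOf (i : Int) + 1 : Nat) : Int) := by push_cast; omega
      rw [harith]
    · rw [if_neg hmem, hsetd]
      by_cases hx : x = (i : Int)
      · have hbeq : (x == (i : Int)) = true := by simpa using hx
        rw [if_pos hx, if_pos (by simp [hx.symm] : (i : Int) ∈ x :: r), List.idxOf_cons, hbeq]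
        simp only [cond_true]
        norm_num
      · have : ¬ ((i : Int) = x ∨ (i : Int) ∈ r) := by
          exact fun h => h.elim (fun h1 => hx h1.symm) hmem
        rw [if_neg hx, if_neg (by simpa [List.mem_cons] using this)]

theorem pvStepB_len (out : List String) (pr : String × List Int) :
    (pvStepB out pr).length = out.length := by
  unfold pvStepB
  split
  · exact pvSetD_len _ _ _
  · exact pvInnerLen _ _ _ _

theorem pvStepB_getD (L : List String) (nm : String) (out : List String)
    (hlen : out.length = L.length) (i : Nat) (hi : i < L.length) :
    (pvStepB out (nm, pvOcc L 0 nm)).getD i "" =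
      if L.getD i "" = nm then pvExp L i else out.getD i "" := by
  have hio : i < out.length := by omega
  by_cases hcount : L.count nm = 1
  · -- singleton group: one direct write
    have hlen1 : (pvOcc L 0 nm).length = 1 := by rw [pvOcc_length]; exact hcount
    obtain ⟨x0, hx0⟩ := List.length_eq_one_iff.1 hlen1
    have hx0mem : x0 ∈ pvOcc L 0 nm := by rw [hx0]; exact List.mem_singleton.2 rfl
    obtain ⟨k0, hk0, hx0eq, hk0get⟩ := (pvOcc_mem L 0 nm x0).1 hx0mem
    have hx0nn : (0 : Int) ≤ x0 := pvOcc_nonneg L nm x0 hx0mem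
    have hbranch : ((pvOcc L 0 nm).length == 1) = true := by simp [hlen1]
    unfold pvStepB
    rw [hx0]
    rw [if_pos (by simp : (([x0] : List Int).length == 1) = true)]
    rw [PySem.List.pyGetD_zero_cons]
    rw [pvSetD_getD out x0 nm hx0nn i hio]
    by_cases hx0i : x0 = (i : Int)
    · have hki : k0 = i := by omega
      have hgi : L.getD i "" = nm := by rw [← hki]; exact hk0get
      rw [if_pos hx0i, if_pos hgi]
      rw [List.getD_eq_getElem?_getD] at hgi
      simp [pvExp, hgi, hcount]
    · rw [if_neg hx0i]
      by_cases hgi : L.getD i "" = nm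
      · exfalso
        have : (i : Int) ∈ pvOcc L 0 nm :=
          (pvOcc_mem L 0 nm (i : Int)).2 ⟨i, hi, by omega, hgi⟩
        rw [hx0] at this
        exact hx0i (List.mem_singleton.1 this).symm
      · rw [if_neg hgi]
  · -- several (or zero) occurrences: enumerated writes
    have hbranch : ((pvOcc L 0 nm).length == 1) = false := by
      simp [pvOcc_length, hcount]
    unfold pvStepB
    simp only [hbranch, Bool.false_eq_true, if_false]
    rw [pvInner nm (pvOcc L 0 nm) 1 out (pvOcc_nodup L 0 nm)
      (fun x hx => pvOcc_nonneg L nm x hx) i hio]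
    by_cases hgi : L.getD i "" = nm
    · have hmem : (i : Int) ∈ pvOcc L 0 nm :=
        (pvOcc_mem L 0 nm (i : Int)).2 ⟨i, hi, by omega, hgi⟩
      rw [if_pos hmem, if_pos hgi]
      have hidx := pvOcc_idxOf L 0 nm i hi hgi
      rw [show ((0 : Int) + (i : Nat)) = ((i : Nat) : Int) by omega] at hidx
      have hc1 : ((L.count nm : Int) == 1) = false := by simpa using hcount
      simp only [pvExp, hgi, hc1, Bool.false_eq_true, if_false]
      have harith : (1 : Int) + (((pvOcc L 0 nm).idxOf (i : Int) : Nat) : Int)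
          = (((L.take (i + 1)).count nm : Nat) : Int) := by
        omega
      rw [harith]
    · have hmem : (i : Int) ∉ pvOcc L 0 nm := by
        intro hmem
        obtain ⟨k, hk, hkeq, hkget⟩ := (pvOcc_mem L 0 nm (i : Int)).1 hmem
        have : k = i := by omega
        exact hgi (this ▸ hkget)
      rw [if_neg hmem, if_neg hgi]

theorem pvScatter (L : List String) : ∀ (names : List String) (out : List String),
    out.length = L.length →
    ((names.map (fun nm => (nm, pvOcc L 0 nm))).foldl pvStepB out).length = L.length ∧
    ∀ (i : Nat), i < L.length →
      ((names.map (fun nm => (nm, pvOcc L 0 nm))).foldl pvStepB out).getD i "" =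
        if L.getD i "" ∈ names then pvExp L i else out.getD i "" := by
  intro names
  induction names with
  | nil =>
    intro out hlen
    refine ⟨by simpa using hlen, fun i hi => by simp⟩
  | cons nm rest ih =>
    intro out hlen
    rw [List.map_cons, List.foldl_cons]
    have hlen' : (pvStepB out (nm, pvOcc L 0 nm)).length = L.length := by
      rw [pvStepB_len]; exact hlen
    obtain ⟨ihlen, ihget⟩ := ih (pvStepB out (nm, pvOcc L 0 nm)) hlen'
    refine ⟨ihlen, fun i hi => ?_⟩
    rw [ihget i hi, pvStepB_getD L nm out hlen i hi]
    by_cases hrest : L.getD i "" ∈ rest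
    · rw [if_pos hrest, if_pos (List.mem_cons_of_mem _ hrest)]
    · rw [if_neg hrest]
      by_cases hnm : L.getD i "" = nm
      · rw [if_pos hnm, if_pos (List.mem_cons.2 (Or.inl hnm))]
      · rw [if_neg hnm, if_neg (fun h => (List.mem_cons.1 h).elim hnm hrest)]

-- ===== VERDICT (by name: the statement is the Claim_ definition above) =====
theorem make_unique_source_names_spec : Claim_equal_make_unique_source_names := by
  intro L _
  unfold Spec_make_unique_source_names
  have hA : make_unique_source_names L =
      (L.foldl (pvStepA (L.foldl (fun d s => d.insert s (d.getD s 0 + 1)) PySem.Dict.empty))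
        (PySem.Dict.empty, [])).2 := rfl
  have halt : make_unique_source_names_alt L =
      (((PySem.List.enumerate L 0).foldl (fun d p => d.modify p.2 [] (fun l => l ++ [p.1]))
          PySem.Dict.empty).items.foldl pvStepB (List.replicate L.length "")) := rfl
  have ht : ∀ s, (L.foldl (fun d s => d.insert s (d.getD s 0 + 1)) PySem.Dict.empty).getD s 0
      = (L.count s : Int) := by
    intro s
    rw [PySem.Dict.getD_foldl_insert_add_one]
    simp
  rw [hA, halt, pvA_loop L _ ht L [] PySem.Dict.empty []
    (by intro s; simp [PySem.Dict.getD_empty])]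
  rw [List.nil_append]
  -- characterise the positions dict
  have hkeys : ((PySem.List.enumerate L 0).foldl
      (fun d p => d.modify p.2 [] (fun l => l ++ [p.1])) PySem.Dict.empty).keys
      = PySem.Set.ofList L := by
    rw [PySem.Dict.keys_foldl_modify_key]
    rw [PySem.Dict.keys_empty, PySem.Set.update_nil_left, PySem.List.map_snd_enumerate]
  have hnodup : ((PySem.List.enumerate L 0).foldl
      (fun d p => d.modify p.2 [] (fun l => l ++ [p.1])) PySem.Dict.empty).keys.Nodup := by
    rw [hkeys]; exact PySem.Set.nodup_ofList L
  have hgetD : ∀ nm, ((PySem.List.enumerate L 0).foldl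
      (fun d p => d.modify p.2 [] (fun l => l ++ [p.1])) PySem.Dict.empty).getD nm []
      = pvOcc L 0 nm := by
    intro nm
    rw [pvGrp]
    simp [pvOcc, PySem.Dict.getD_empty]
  rw [PySem.Dict.items_eq_map_keys _ hnodup []]
  rw [List.map_congr_left (fun nm _ => by simp only [hgetD nm] :
    ∀ nm ∈ ((PySem.List.enumerate L 0).foldl
      (fun d p => d.modify p.2 [] (fun l => l ++ [p.1])) PySem.Dict.empty).keys,
      (fun k => (k, ((PySem.List.enumerate L 0).foldl
        (fun d p => d.modify p.2 [] (fun l => l ++ [p.1])) PySem.Dict.empty).getD k [])) nm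
        = (fun nm => (nm, pvOcc L 0 nm)) nm)]
  obtain ⟨hslen, hsget⟩ := pvScatter L (((PySem.List.enumerate L 0).foldl
      (fun d p => d.modify p.2 [] (fun l => l ++ [p.1])) PySem.Dict.empty).keys)
      (List.replicate L.length "") (by simp)
  apply List.ext_getElem
  · rw [pvEmit_length, hslen]
  · intro i h1 h2
    have hiL : i < L.length := by rw [pvEmit_length] at h1; exact h1
    have e1 : (pvEmit L [] L).getD i "" = pvExp L i := by
      have := pvEmit_getD L L [] (by simp) i hiL
      simpa using this
    have hmemK : L.getD i "" ∈ ((PySem.List.enumerate L 0).foldl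
        (fun d p => d.modify p.2 [] (fun l => l ++ [p.1])) PySem.Dict.empty).keys := by
      rw [hkeys, PySem.Set.mem_ofList]
      rw [List.getD_eq_getElem _ _ hiL]
      exact List.getElem_mem hiL
    have e2 := hsget i hiL
    rw [if_pos hmemK] at e2
    have g1 : (pvEmit L [] L)[i] = (pvEmit L [] L).getD i "" := by
      rw [List.getD_eq_getElem _ _ h1]
    have g2 := (List.getD_eq_getElem _ ""  h2).symm
    rw [g1, e1, ← e2, ← g2]
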